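-- pv_equiv track=rewrite | github.com/baonguyen254/Py_for_DS | AI/Lab04/Shortest_Path_2_Point.py | adjoining_points
-- ===== SOURCE A (Python) =====
-- from collections import defaultdict
--
-- def adjoining_points(total_polygons,polygons):
--     ''' Return the adjacent points of each point in the polygon'''
--     adjacent_points = defaultdict(list)
--     edges = all_edges(total_polygons,polygons)
--     for edge in edges:
--         point1 = edge[0]
--         point2 = edge[1]
--         adjacent_points[point1].append(point2)
--         adjacent_points[point2].append(point1)
--     return adjacent_points
--
-- def all_edges(total_polygons, polygons):
--     ''' get all edge of each polygon'''
--     edges = []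
--     for i in range(total_polygons):
--         pol = polygons[i]
--         num_ver = len(polygons[i])
--         for j in range(num_ver):
--             edge = [pol[j % num_ver], pol[(j + 1) % num_ver]]
--             edges.append(edge)
--     return edges
-- ===== SOURCE B (Python) =====
-- def adjoining_points(total_polygons, polygons):
--     ''' Return the adjacent points of each point in the polygon'''
--     events = []
--     for i in range(total_polygons):
--         pol = polygons[i]
--         for p, q in zip(pol, pol[1:] + pol[:1]):
--             events += [(p, q), (q, p)]
--     keys = list(dict.fromkeys(k for k, _ in events))
--     return {k: [v for kk, v in events if kk == k] for k in keys}
-- ===== Notes on version B (the rewrite author's own statement) =====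
-- stated objective: alternative
-- what changed: Instead of incrementally appending into a defaultdict per edge, B emits a flat (point, neighbour) event stream, derives the key order by ordered dedup (dict.fromkeys) and builds each adjacency list with one filter comprehension per key.
import Mathlib
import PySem

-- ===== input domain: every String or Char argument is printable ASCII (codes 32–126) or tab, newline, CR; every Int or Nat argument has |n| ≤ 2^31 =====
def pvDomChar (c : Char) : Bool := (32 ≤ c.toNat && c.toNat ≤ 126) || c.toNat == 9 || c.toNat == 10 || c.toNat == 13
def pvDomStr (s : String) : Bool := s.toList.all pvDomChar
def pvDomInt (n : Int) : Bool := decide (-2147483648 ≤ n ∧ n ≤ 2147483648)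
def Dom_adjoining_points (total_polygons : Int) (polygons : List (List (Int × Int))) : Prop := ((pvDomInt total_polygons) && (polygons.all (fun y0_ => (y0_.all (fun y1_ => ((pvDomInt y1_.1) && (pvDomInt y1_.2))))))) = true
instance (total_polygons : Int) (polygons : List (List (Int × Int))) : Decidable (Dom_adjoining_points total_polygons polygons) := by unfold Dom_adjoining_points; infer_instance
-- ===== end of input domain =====

-- B replaces A's incremental defaultdict build with a flat event stream that is then grouped:
-- key order by ordered dedup of the stream's keys, each adjacency list by a per-key filter;
-- objective: alternative (no dict is built incrementally).


-- ===== PORT A =====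
-- helper all_edges: edges as pairs (edge[0], edge[1]); pol[j % num_ver] via pyGetD (in range under Pre_)
def pvAllEdges (total_polygons : Int) (polygons : List (List (Int × Int))) : List ((Int × Int) × (Int × Int)) :=
  (PySem.List.pyRange 0 total_polygons 1).foldl (fun edges i =>
    let pol := PySem.List.pyGetD polygons i []
    let num_ver : Int := pol.length
    (PySem.List.pyRange 0 num_ver 1).foldl (fun edges j =>
      edges ++ [(PySem.List.pyGetD pol (PySem.Int.mod j num_ver) (0, 0),
                 PySem.List.pyGetD pol (PySem.Int.mod (j + 1) num_ver) (0, 0))]) edges) []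

def adjoining_points (total_polygons : Int) (polygons : List (List (Int × Int))) : List (Int × Int × List (Int × Int)) :=
  let edges := pvAllEdges total_polygons polygons
  ((edges.foldl (fun d e =>
      let d1 := d.modify e.1 [] (fun l => l ++ [e.2])
      d1.modify e.2 [] (fun l => l ++ [e.1]))
    (PySem.Dict.empty : PySem.Dict (Int × Int) (List (Int × Int)))).items).map
    (fun p => (p.1.1, p.1.2, p.2))

-- ===== PORT B =====
-- B: build the flat event stream, dedup its keys in first-occurrence order
-- (list(dict.fromkeys(...)) = PySem.List.dedup), then one filter per key.
def adjoining_points_alt (total_polygons : Int) (polygons : List (List (Int × Int))) : List (Int × Int × List (Int × Int)) :=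
  let events := (PySem.List.pyRange 0 total_polygons 1).foldl (fun ev i =>
      let pol := PySem.List.pyGetD polygons i []
      (pol.zip (PySem.List.slice pol (some 1) none ++ PySem.List.slice pol none (some 1))).foldl
        (fun ev pq => ev ++ [(pq.1, pq.2), (pq.2, pq.1)]) ev) []
  let keys := PySem.List.dedup (events.map (fun e => e.1))
  keys.map (fun k => (k.1, k.2, (events.filter (fun e => e.1 == k)).map (fun e => e.2)))

-- ===== PRECONDITION & SPEC =====
-- Python A raises IndexError (polygons[i]) exactly when total_polygons > len(polygons).
def Pre_adjoining_points (total_polygons : Int) (polygons : List (List (Int × Int))) : Prop :=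
  total_polygons ≤ (polygons.length : Int)
instance (total_polygons : Int) (polygons : List (List (Int × Int))) : Decidable (Pre_adjoining_points total_polygons polygons) := by unfold Pre_adjoining_points; infer_instance
def pvWitness_adjoining_points : Int × (List (List (Int × Int))) := (1, [[(0, 0), (1, 0), (0, 1)]])

def Spec_adjoining_points (total_polygons : Int) (polygons : List (List (Int × Int))) (out : List (Int × Int × List (Int × Int))) : Prop := out = adjoining_points_alt total_polygons polygons
instance (total_polygons : Int) (polygons : List (List (Int × Int))) (out : List (Int × Int × List (Int × Int))) : Decidable (Spec_adjoining_points total_polygons polygons out) := by unfold Spec_adjoining_points; infer_instance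

-- ===== CLAIM (what is proved, stated in full; the proofs are below) =====
def Claim_equal_adjoining_points : Prop := ∀ (total_polygons : Int) (polygons : List (List (Int × Int))), Dom_adjoining_points total_polygons polygons → Pre_adjoining_points total_polygons polygons → Spec_adjoining_points total_polygons polygons (adjoining_points total_polygons polygons)

-- ===== LEMMAS AND PROOFS =====

-- the inner edge enumeration of all_edges (modulo indexing over range(num_ver)) is exactly the zip pairing
theorem pvEdges_zip (pol : List (Int × Int)) :
    (PySem.List.pyRange 0 (pol.length : Int) 1).map (fun j =>
        (PySem.List.pyGetD pol (PySem.Int.mod j (pol.length : Int)) (0, 0),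
         PySem.List.pyGetD pol (PySem.Int.mod (j + 1) (pol.length : Int)) (0, 0)))
      = pol.zip (pol.drop 1 ++ pol.take 1) := by
  apply List.ext_getElem
  · simp [PySem.List.length_pyRange_one]
    omega
  · intro k h1 h2
    have hk : k < pol.length := by
      simpa [PySem.List.length_pyRange_one] using h1
    have hn : 0 < pol.length := Nat.lt_of_le_of_lt (Nat.zero_le k) hk
    simp only [List.getElem_map, PySem.List.getElem_pyRange_one, zero_add, List.getElem_zip]
    have hmod1 : PySem.Int.mod (k : Int) (pol.length : Int) = (k : Int) := by
      rw [PySem.Int.mod_eq_emod_of_pos (by exact_mod_cast hn)]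
      exact Int.emod_eq_of_lt (by positivity) (by exact_mod_cast hk)
    have hfst : PySem.List.pyGetD pol (PySem.Int.mod (k : Int) (pol.length : Int)) (0, 0) = pol[k] := by
      rw [hmod1, PySem.List.pyGetD_natCast]
      exact List.getD_eq_getElem _ _ hk
    by_cases hc : k + 1 < pol.length
    · have hmod2 : PySem.Int.mod ((k : Int) + 1) (pol.length : Int) = ((k : Int) + 1) := by
        rw [PySem.Int.mod_eq_emod_of_pos (by exact_mod_cast hn)]
        exact Int.emod_eq_of_lt (by positivity) (by exact_mod_cast hc)
      have hsnd : PySem.List.pyGetD pol (PySem.Int.mod ((k : Int) + 1) (pol.length : Int)) (0, 0) = pol[k + 1] := by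
        rw [hmod2]
        have : ((k : Int) + 1) = ((k + 1 : Nat) : Int) := by push_cast; ring
        rw [this, PySem.List.pyGetD_natCast]
        exact List.getD_eq_getElem _ _ hc
      rw [hfst, hsnd]
      have hlt : k < (pol.drop 1).length := by simp; omega
      rw [List.getElem_append_left hlt]
      simp
    · have hke : k + 1 = pol.length := by omega
      have hmod2 : PySem.Int.mod ((k : Int) + 1) (pol.length : Int) = 0 := by
        rw [PySem.Int.mod_eq_emod_of_pos (by exact_mod_cast hn)]
        have : ((k : Int) + 1) = (pol.length : Int) := by exact_mod_cast hke
        rw [this]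
        exact Int.emod_self
      have hsnd : PySem.List.pyGetD pol (PySem.Int.mod ((k : Int) + 1) (pol.length : Int)) (0, 0) = pol[0] := by
        rw [hmod2]
        have h0 : ((0 : Nat) : Int) = (0 : Int) := rfl
        rw [← h0, PySem.List.pyGetD_natCast]
        exact List.getD_eq_getElem _ _ hn
      rw [hfst, hsnd]
      have hge : ¬ k < (pol.drop 1).length := by simp; omega
      rw [List.getElem_append_right (by simpa using hge)]
      simp [List.getElem_take, show k - (pol.length - 1) = 0 from by omega]

theorem pvAllEdges_eq (total_polygons : Int) (polygons : List (List (Int × Int))) :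
    pvAllEdges total_polygons polygons
      = (PySem.List.pyRange 0 total_polygons 1).flatMap (fun i =>
          let pol := PySem.List.pyGetD polygons i []
          pol.zip (pol.drop 1 ++ pol.take 1)) := by
  unfold pvAllEdges
  conv_rhs => rw [← List.nil_append ((PySem.List.pyRange 0 total_polygons 1).flatMap _)]
  rw [← PySem.List.foldl_append_eq_flatMap]
  apply PySem.List.foldl_congr_mem
  intro acc i _
  dsimp only
  rw [PySem.List.foldl_append_singleton_eq_map, pvEdges_zip]

-- doubling fold: A's two modifies per edge are the single-modify fold over the doubled event stream
theorem pvFold_two_modifies (edges : List ((Int × Int) × (Int × Int)))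
    (d : PySem.Dict (Int × Int) (List (Int × Int))) :
    edges.foldl (fun d e =>
        let d1 := d.modify e.1 [] (fun l => l ++ [e.2])
        d1.modify e.2 [] (fun l => l ++ [e.1])) d
      = (edges.flatMap (fun e => [(e.1, e.2), (e.2, e.1)])).foldl
          (fun d p => d.modify p.1 [] (fun l => l ++ [p.2])) d := by
  induction edges generalizing d with
  | nil => rfl
  | cons e es ih => simp only [List.foldl_cons, List.flatMap_cons, List.foldl_append, List.foldl_nil, ih]

-- B's event-stream fold in flatMap normal form
theorem pvEvents_eq (total_polygons : Int) (polygons : List (List (Int × Int))) :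
    ((PySem.List.pyRange 0 total_polygons 1).foldl (fun ev i =>
        let pol := PySem.List.pyGetD polygons i []
        (pol.zip (PySem.List.slice pol (some 1) none ++ PySem.List.slice pol none (some 1))).foldl
          (fun ev pq => ev ++ [(pq.1, pq.2), (pq.2, pq.1)]) ev) ([] : List ((Int × Int) × (Int × Int))))
      = ((PySem.List.pyRange 0 total_polygons 1).flatMap (fun i =>
          let pol := PySem.List.pyGetD polygons i []
          pol.zip (pol.drop 1 ++ pol.take 1))).flatMap (fun e => [(e.1, e.2), (e.2, e.1)]) := by
  rw [List.flatMap_assoc]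
  conv_rhs => rw [← List.nil_append ((PySem.List.pyRange 0 total_polygons 1).flatMap _)]
  rw [← PySem.List.foldl_append_eq_flatMap]
  apply PySem.List.foldl_congr_mem
  intro acc i _
  dsimp only
  rw [PySem.List.slice_from_one, PySem.List.slice_to _ (by norm_num), List.drop_one]
  conv_rhs => rw [← PySem.List.foldl_append_eq_flatMap]
  norm_num

-- items of the single-modify grouping fold from empty = ordered-dedup keys with per-key filters
theorem pvGroup_items (evs : List ((Int × Int) × (Int × Int))) :
    (evs.foldl (fun d p => d.modify p.1 [] (fun l => l ++ [p.2]))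
        (PySem.Dict.empty : PySem.Dict (Int × Int) (List (Int × Int)))).items
      = (PySem.List.dedup (evs.map (fun e => e.1))).map
          (fun k => (k, (evs.filter (fun e => e.1 == k)).map (fun e => e.2))) := by
  set d := evs.foldl (fun d p => d.modify p.1 [] (fun l => l ++ [p.2]))
      (PySem.Dict.empty : PySem.Dict (Int × Int) (List (Int × Int))) with hd
  have hnd : d.keys.Nodup := by
    rw [hd]
    exact PySem.Dict.nodup_keys_foldl_modify_key evs (fun p => p.1) [] (fun _ p l => l ++ [p.2]) _
      PySem.Dict.nodup_keys_empty
  rw [PySem.Dict.items_eq_map_keys d hnd []]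
  have hkeys : d.keys = PySem.List.dedup (evs.map (fun e => e.1)) := by
    rw [hd, PySem.Dict.keys_foldl_modify_key evs (fun p => p.1) [] (fun _ p l => l ++ [p.2])]
    simp [PySem.List.dedup_eq_ofList, PySem.Set.update, PySem.Set.ofList_eq_foldl]
  rw [hkeys]
  apply List.map_congr_left
  intro k _
  have := PySem.Dict.getD_foldl_modify_append evs
      (PySem.Dict.empty : PySem.Dict (Int × Int) (List (Int × Int))) k
  rw [hd]
  simp only [this, PySem.Dict.getD_empty, List.nil_append]

-- ===== VERDICT (by name: the statement is the Claim_ definition above) =====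
theorem adjoining_points_spec : Claim_equal_adjoining_points := by
  intro total_polygons polygons _ _
  unfold Spec_adjoining_points adjoining_points adjoining_points_alt
  dsimp only
  rw [pvEvents_eq, pvAllEdges_eq, pvFold_two_modifies, pvGroup_items, List.map_map]
  rfl
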